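-- pv_equiv track=rewrite | github.com/mit1221/Coursera-Algorithms-and-Data-Structures | week3_greedy_algorithms/largest_number.py | isGreaterOrEqual
-- ===== SOURCE A (Python) =====
-- def isGreaterOrEqual(num1, num2) -> bool:
--     """Return True if num1 is greater than or equal to num2"""
--     num1_list = [num1[i] for i in range(len(num1))]
--     num2_list = [num2[i] for i in range(len(num2))]
--     i = 0
--     j = 0
--     counter = 0
--     while counter != max(len(num1_list), len(num2_list)):
--         if num1_list[i] > num2_list[j]:
--             return True
--         elif num1_list[i] < num2_list[j]:
--             return False
--         else:
--             if i + 1 <= len(num1_list) - 1: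
--                 i += 1
--             if j + 1 <= len(num2_list) - 1:
--                 j += 1
--         counter += 1
--     return True
-- ===== SOURCE B (Python) =====
-- def isGreaterOrEqual(num1, num2) -> bool:
--     """True iff num1 >= num2 under the comparison where the shorter string is
--     read as if its last character repeated forever
--     (e.g. '13' vs '132' compares as '133' vs '132')."""
--     m = min(len(num1), len(num2))
--     if num1[:m] != num2[:m]:
--         return num1 >= num2
--     if len(num2) > m:            # num1 is a proper prefix of num2
--         fill = num1[-1]
--         for ch in num2[m:]:
--             if ch != fill:
--                 return fill > ch
--         return True
--     if len(num1) > m:            # num2 is a proper prefix of num1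
--         fill = num2[-1]
--         for ch in num1[m:]:
--             if ch != fill:
--                 return ch > fill
--         return True
--     return True
-- ===== Notes on version B (the rewrite author's own statement) =====
-- stated objective: faster
-- what changed: Replaces A's sticky two-pointer/counter while-loop with a three-case decomposition: compare the common-length prefixes with one built-in string comparison, and if one string is a prefix of the other, scan the longer string's remaining suffix against the shorter string's final character. Pre_ excludes inputs where exactly one string is empty, on which both A and B raise IndexError.
import Mathlib
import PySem

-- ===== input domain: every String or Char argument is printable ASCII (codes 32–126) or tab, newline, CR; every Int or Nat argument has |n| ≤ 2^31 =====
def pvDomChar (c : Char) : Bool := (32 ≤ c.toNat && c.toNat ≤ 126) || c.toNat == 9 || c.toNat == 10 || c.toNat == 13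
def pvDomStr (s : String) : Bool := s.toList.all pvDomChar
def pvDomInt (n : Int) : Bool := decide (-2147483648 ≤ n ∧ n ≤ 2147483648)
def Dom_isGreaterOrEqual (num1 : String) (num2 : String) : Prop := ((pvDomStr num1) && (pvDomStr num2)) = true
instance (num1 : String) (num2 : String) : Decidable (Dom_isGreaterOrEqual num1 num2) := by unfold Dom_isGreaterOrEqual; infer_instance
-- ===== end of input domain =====

-- B replaces A's sticky two-pointer while-loop with a three-case decomposition: one
-- built-in comparison of the common-length prefixes, else a scan of the longer string's
-- suffix against the shorter's last character (objective: faster, constant-factor: built-in slicing/comparison replace the per-char loop).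


-- ===== PORT A =====
-- A's while-loop: i, j stick at the last index; fuel = max(len1,len2) - counter.
-- `getD _ ' '` stands for num_list[i]: under Pre_ the index is always in range (Python
-- raises IndexError exactly on the inputs Pre_ excludes).
def pvAGo (l1 l2 : List Char) (i j : Nat) : Nat → Bool
  | 0 => true
  | fuel + 1 =>
    let c1 := l1.getD i ' '
    let c2 := l2.getD j ' '
    if c1 > c2 then true
    else if c1 < c2 then false
    else
      pvAGo l1 l2 (if i + 1 ≤ l1.length - 1 then i + 1 else i)
                  (if j + 1 ≤ l2.length - 1 then j + 1 else j) fuel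

def isGreaterOrEqual (num1 : String) (num2 : String) : Bool :=
  let num1_list := num1.toList
  let num2_list := num2.toList
  pvAGo num1_list num2_list 0 0 (max num1_list.length num2_list.length)

-- ===== PORT B =====
-- Python's built-in string >= (lexicographic by code point, shorter prefix is smaller).
def pvStrGe : List Char → List Char → Bool
  | _, [] => true
  | [], _ :: _ => false
  | a :: as, b :: bs => if a > b then true else if a < b then false else pvStrGe as bs

-- B's first loop: `for ch in suffix: if ch != fill: return fill > ch` then `return True`.
def pvFillGe (fill : Char) : List Char → Bool
  | [] => true
  | ch :: rest => if ch ≠ fill then fill > ch else pvFillGe fill rest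

-- B's second loop: `for ch in suffix: if ch != fill: return ch > fill` then `return True`.
def pvSuffGe (fill : Char) : List Char → Bool
  | [] => true
  | ch :: rest => if ch ≠ fill then ch > fill else pvSuffGe fill rest

-- `getLast?.getD ' '` stands for num[-1]: under Pre_ that string is nonempty whenever the
-- branch evaluating it is reached (Python raises IndexError on the inputs Pre_ excludes).
def isGreaterOrEqual_alt (num1 : String) (num2 : String) : Bool :=
  let l1 := num1.toList
  let l2 := num2.toList
  let m := min l1.length l2.length
  if l1.take m ≠ l2.take m then pvStrGe l1 l2
  else if l2.length > m then pvFillGe (l1.getLast?.getD ' ') (l2.drop m)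
  else if l1.length > m then pvSuffGe (l2.getLast?.getD ' ') (l1.drop m)
  else true

-- ===== PRECONDITION & SPEC =====
-- Pre_ excludes inputs where exactly one string is empty: there both A and B raise
-- IndexError (A indexes the empty list, B evaluates the empty string's [-1]).
def Pre_isGreaterOrEqual (num1 : String) (num2 : String) : Prop := (num1 = "" ↔ num2 = "")
instance (num1 : String) (num2 : String) : Decidable (Pre_isGreaterOrEqual num1 num2) := by unfold Pre_isGreaterOrEqual; infer_instance
def pvWitness_isGreaterOrEqual : String × String := ("132", "13")

def Spec_isGreaterOrEqual (num1 : String) (num2 : String) (out : Bool) : Prop := out = isGreaterOrEqual_alt num1 num2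
instance (num1 : String) (num2 : String) (out : Bool) : Decidable (Spec_isGreaterOrEqual num1 num2 out) := by unfold Spec_isGreaterOrEqual; infer_instance

-- ===== CLAIM (what is proved, stated in full; the proofs are below) =====
def Claim_equal_isGreaterOrEqual : Prop := ∀ (num1 : String) (num2 : String), Dom_isGreaterOrEqual num1 num2 → Pre_isGreaterOrEqual num1 num2 → Spec_isGreaterOrEqual num1 num2 (isGreaterOrEqual num1 num2)

-- ===== LEMMAS AND PROOFS =====

-- the sequence of characters A's sticking pointer reads from l starting at i, for `fuel` steps
def pvWalk (l : List Char) (i : Nat) : Nat → List Char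
  | 0 => []
  | fuel + 1 => l.getD i ' ' :: pvWalk l (if i + 1 ≤ l.length - 1 then i + 1 else i) fuel

theorem pvAGo_eq_ge (l1 l2 : List Char) (i j fuel : Nat) :
    pvAGo l1 l2 i j fuel = pvStrGe (pvWalk l1 i fuel) (pvWalk l2 j fuel) := by
  induction fuel generalizing i j with
  | zero => rfl
  | succ f ih => simp only [pvAGo, pvWalk, pvStrGe]; split_ifs <;> simp_all

theorem pvWalk_pad (l : List Char) (fuel : Nat) :
    ∀ i, i < l.length →
      pvWalk l i fuel =
        (l.drop i).take fuel ++ List.replicate (fuel - (l.length - i)) (l.getLast?.getD ' ') := by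
  induction fuel with
  | zero => intro i hi; simp [pvWalk]
  | succ f ih =>
    intro i hi
    have hget : l.getD i ' ' = l[i] := List.getD_eq_getElem l ' ' hi
    by_cases h : i + 1 ≤ l.length - 1
    · have hi1 : i + 1 < l.length := by omega
      rw [pvWalk, if_pos h, ih (i+1) hi1, hget]
      have hdrop : l.drop i = l[i] :: l.drop (i+1) := List.drop_eq_getElem_cons hi
      rw [hdrop]
      have harith : f + 1 - (l.length - i) = f - (l.length - (i + 1)) := by omega
      simp only [List.take_succ_cons, List.cons_append, harith]
    · have hlen : l.length = i + 1 := by omega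
      have hdrop : l.drop i = [l[i]] := by
        rw [List.drop_eq_getElem_cons hi, List.drop_eq_nil_of_le (by omega)]
      have hgl : l.getLast?.getD ' ' = l[i] := by
        rw [List.getLast?_eq_getElem?]; simp [hlen]
      rw [pvWalk, if_neg h, ih i hi, hget, hdrop, hgl, hlen]
      cases f with
      | zero => simp
      | succ f' => simp [List.replicate_succ]

theorem pvWalk_zero_pad (l : List Char) (n : Nat) (hne : l ≠ []) (hn : l.length ≤ n) :
    pvWalk l 0 n = l ++ List.replicate (n - l.length) (l.getLast?.getD ' ') := by
  rw [pvWalk_pad l n 0 (List.length_pos_of_ne_nil hne)]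
  simp [List.take_of_length_le hn]

-- equal same-length prefixes cancel
theorem pvStrGe_append_left (p a b : List Char) :
    pvStrGe (p ++ a) (p ++ b) = pvStrGe a b := by
  induction p with
  | nil => rfl
  | cons c cs ih =>
    cases h : pvStrGe a b <;>
      simp [pvStrGe, ih, h]

-- a first difference inside same-length prefixes decides, whatever follows
theorem pvStrGe_append_ne (a b : List Char) (hlen : a.length = b.length) (hne : a ≠ b) :
    ∀ x y, pvStrGe (a ++ x) (b ++ y) = pvStrGe a b := by
  induction a generalizing b with
  | nil => cases b with
    | nil => exact absurd rfl hne
    | cons _ _ => simp at hlen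
  | cons c cs ih =>
    cases b with
    | nil => simp at hlen
    | cons d ds =>
      intro x y
      by_cases hcd : c = d
      · subst hcd
        have hne' : cs ≠ ds := fun h => hne (by rw [h])
        simp only [List.cons_append, pvStrGe, gt_iff_lt, lt_self_iff_false, if_false]
        exact ih ds (by simpa using hlen) hne' x y
      · rcases lt_trichotomy c d with h | h | h
        · simp [pvStrGe, h, not_lt_of_gt h]
        · exact absurd h hcd
        · simp [pvStrGe, h]

theorem pvStrGe_replicate_left (c : Char) (s : List Char) :
    pvStrGe (List.replicate s.length c) s = pvFillGe c s := by
  induction s with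
  | nil => rfl
  | cons ch rest ih =>
    simp only [List.length_cons, List.replicate_succ, pvStrGe, pvFillGe]
    by_cases h : ch = c
    · subst h; simp [ih]
    · rcases lt_trichotomy c ch with hlt | he | hgt
      · simp [hlt, not_lt_of_gt hlt, h]
      · exact absurd he.symm h
      · simp [hgt, h]

theorem pvStrGe_replicate_right (c : Char) (s : List Char) :
    pvStrGe s (List.replicate s.length c) = pvSuffGe c s := by
  induction s with
  | nil => rfl
  | cons ch rest ih =>
    simp only [List.length_cons, List.replicate_succ, pvStrGe, pvSuffGe]
    by_cases h : ch = c
    · subst h; simp [ih]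
    · rcases lt_trichotomy ch c with hlt | he | hgt
      · simp [hlt, not_lt_of_gt hlt, h]
      · exact absurd he h
      · simp [hgt, h]

-- ===== VERDICT (by name: the statement is the Claim_ definition above) =====
theorem isGreaterOrEqual_spec : Claim_equal_isGreaterOrEqual := by
  intro num1 num2 _ hpre
  unfold Spec_isGreaterOrEqual isGreaterOrEqual isGreaterOrEqual_alt
  simp only []
  set l1 := num1.toList with h1
  set l2 := num2.toList with h2
  have hiff : l1 = [] ↔ l2 = [] := by
    unfold Pre_isGreaterOrEqual at hpre
    constructor <;> intro h
    · rw [h2, hpre.mp (by rwa [← String.toList_eq_nil_iff, ← h1]), String.toList_eq_nil_iff]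
    · rw [h1, hpre.mpr (by rwa [← String.toList_eq_nil_iff, ← h2]), String.toList_eq_nil_iff]
  by_cases he : l1 = []
  · have he2 : l2 = [] := hiff.mp he
    simp [he, he2, pvAGo]
  · have he2 : l2 ≠ [] := fun h => he (hiff.mpr h)
    have hl1 : l1.length ≤ max l1.length l2.length := le_max_left _ _
    have hl2 : l2.length ≤ max l1.length l2.length := le_max_right _ _
    set n := max l1.length l2.length with hn
    set m := min l1.length l2.length with hm
    rw [pvAGo_eq_ge, pvWalk_zero_pad l1 _ he hl1, pvWalk_zero_pad l2 _ he2 hl2]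
    by_cases hp : l1.take m = l2.take m
    · -- equal common prefixes: cancel and compare the remainders
      rw [if_neg (by simpa using hp)]
      rcases lt_trichotomy l1.length l2.length with hlt | heq | hgt
      · -- num1 is a proper prefix of num2
        have hm1 : m = l1.length := by omega
        have htake1 : l1.take m = l1 := by rw [hm1]; exact List.take_length
        have hl2eq : l2.take m = l1 := by rw [← hp, htake1]
        have hsplit : l2 = l1 ++ l2.drop m := by
          conv_lhs => rw [← List.take_append_drop m l2, hl2eq]
        have hrep0 : n - l2.length = 0 := by omega
        have hlen2 : (l2.drop m).length = n - l1.length := by simp [hm1]; omega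
        rw [if_pos (by omega : l2.length > m), hrep0]
        simp only [List.replicate_zero, List.append_nil]
        conv_lhs => rw [hsplit]
        rw [pvStrGe_append_left, ← hlen2]
        exact pvStrGe_replicate_left _ _
      · -- same length with equal prefixes: the strings are equal
        have h1t : l1.take m = l1 := by rw [(by omega : m = l1.length)]; exact List.take_length
        have h2t : l2.take m = l2 := by rw [(by omega : m = l2.length)]; exact List.take_length
        have hl12 : l1 = l2 := by rw [← h1t, hp, h2t]
        have hrep1 : n - l1.length = 0 := by omega
        have hrep2 : n - l2.length = 0 := by omega
        rw [if_neg (by omega), if_neg (by omega), hrep1, hrep2]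
        simp only [List.replicate_zero, List.append_nil]
        rw [hl12]
        simpa using pvStrGe_append_left l2 [] []
      · -- num2 is a proper prefix of num1
        have hm2 : m = l2.length := by omega
        have htake2 : l2.take m = l2 := by rw [hm2]; exact List.take_length
        have hl1eq : l1.take m = l2 := by rw [hp, htake2]
        have hsplit : l1 = l2 ++ l1.drop m := by
          conv_lhs => rw [← List.take_append_drop m l1, hl1eq]
        have hrep0 : n - l1.length = 0 := by omega
        have hlen1 : (l1.drop m).length = n - l2.length := by simp [hm2]; omega
        rw [if_neg (by omega), if_pos (by omega : l1.length > m), hrep0]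
        simp only [List.replicate_zero, List.append_nil]
        conv_lhs => rw [hsplit]
        rw [pvStrGe_append_left, ← hlen1]
        exact pvStrGe_replicate_right _ _
    · -- prefixes differ: both sides are decided at the first difference, before any padding
      rw [if_pos (by simpa using hp)]
      have hlent : (l1.take m).length = (l2.take m).length := by
        simp [hm]
      have h1' : pvStrGe (l1 ++ List.replicate (n - l1.length) (l1.getLast?.getD ' '))
                         (l2 ++ List.replicate (n - l2.length) (l2.getLast?.getD ' '))
          = pvStrGe (l1.take m) (l2.take m) := by
        conv_lhs => rw [(List.take_append_drop m l1).symm, (List.take_append_drop m l2).symm]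
        simp only [List.append_assoc]
        exact pvStrGe_append_ne _ _ hlent hp _ _
      have h2' : pvStrGe l1 l2 = pvStrGe (l1.take m) (l2.take m) := by
        conv_lhs => rw [(List.take_append_drop m l1).symm, (List.take_append_drop m l2).symm]
        exact pvStrGe_append_ne _ _ hlent hp _ _
      rw [h1', h2']
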